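-- pv_equiv track=rewrite | github.com/raywang6/ml | mlprod/features.py | compute_streak
-- ===== SOURCE A (Python) =====
-- def compute_streak(returns):
--     streak, current_streak = 0, 0
--     for return_value in returns:
--         if return_value > 0:
--             current_streak = current_streak + 1 if current_streak >= 0 else 1
--         elif return_value < 0:
--             current_streak = current_streak - 1 if current_streak <= 0 else -1
--         else:
--             current_streak = 0
--         streak = streak if abs(streak) > abs(current_streak) else current_streak
--     return streak
-- ===== SOURCE B (Python) =====
-- def compute_streak(returns):
--     def sign(v):
--         return 1 if v > 0 else (-1 if v < 0 else 0)
--     # pass 1: signed run-length encoding (0 for each zero value)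
--     runs = []
--     for v in returns:
--         s = sign(v)
--         if runs and s != 0 and sign(runs[-1]) == s:
--             runs[-1] += s
--         else:
--             runs.append(s)
--     # pass 2: keep the run of largest magnitude, later run wins ties
--     best = 0
--     for r in runs:
--         if abs(r) >= abs(best):
--             best = r
--     return best
-- ===== Notes on version B (the rewrite author's own statement) =====
-- stated objective: alternative
-- what changed: B first builds a signed run-length encoding of the sign sequence, then reduces over whole runs keeping the run of largest magnitude with later-wins tie-breaking, instead of A's single fused loop that updates a running streak and a best at every element.
import Mathlib
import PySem

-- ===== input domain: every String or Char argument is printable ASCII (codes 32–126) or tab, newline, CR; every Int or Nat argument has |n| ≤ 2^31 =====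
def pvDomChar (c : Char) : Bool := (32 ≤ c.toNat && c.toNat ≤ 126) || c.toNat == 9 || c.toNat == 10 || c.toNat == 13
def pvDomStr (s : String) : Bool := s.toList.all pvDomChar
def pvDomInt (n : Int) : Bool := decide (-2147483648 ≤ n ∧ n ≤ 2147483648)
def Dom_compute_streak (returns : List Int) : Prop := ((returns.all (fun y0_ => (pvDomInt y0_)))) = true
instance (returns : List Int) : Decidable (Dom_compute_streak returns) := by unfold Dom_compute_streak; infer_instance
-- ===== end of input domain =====

-- B replaces A's fused streak-and-best loop by a two-pass decomposition: signed run-length encoding, then a later-wins max-by-magnitude reduce.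


-- ===== PORT A =====
-- one iteration of A's loop on the state (streak, current_streak)
def pvStepA (st : Int × Int) (v : Int) : Int × Int :=
  let cur : Int :=
    if v > 0 then (if st.2 ≥ 0 then st.2 + 1 else 1)
    else if v < 0 then (if st.2 ≤ 0 then st.2 - 1 else -1)
    else 0
  ((if st.1.natAbs > cur.natAbs then st.1 else cur), cur)

def compute_streak (returns : List Int) : Int :=
  (returns.foldl pvStepA (0, 0)).1

-- ===== PORT B =====
def pvSign (v : Int) : Int := if v > 0 then 1 else if v < 0 then -1 else 0

-- Source B's run builder; the runs list is kept with the most recent run (runs[-1]) at the head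
def pvAddRun (acc : List Int) (v : Int) : List Int :=
  match acc with
  | r :: rest => if pvSign v ≠ 0 ∧ pvSign r = pvSign v then (r + pvSign v) :: rest else pvSign v :: r :: rest
  | [] => [pvSign v]

def pvBest (best r : Int) : Int := if r.natAbs ≥ best.natAbs then r else best

def compute_streak_alt (returns : List Int) : Int :=
  ((returns.foldl pvAddRun []).reverse).foldl pvBest 0

-- ===== PRECONDITION & SPEC =====
def Spec_compute_streak (returns : List Int) (out : Int) : Prop := out = compute_streak_alt returns
instance (returns : List Int) (out : Int) : Decidable (Spec_compute_streak returns out) := by unfold Spec_compute_streak; infer_instance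

-- ===== CLAIM (what is proved, stated in full; the proofs are below) =====
def Claim_equal_compute_streak : Prop := ∀ (returns : List Int), Dom_compute_streak returns → Spec_compute_streak returns (compute_streak returns)

-- ===== LEMMAS AND PROOFS =====

-- one step: A's new current_streak is the head (most recent run) of B's updated runs list
lemma step_head (acc : List Int) (a c v : Int) (h : c = acc.headD 0) :
    (pvStepA (a, c) v).2 = (pvAddRun acc v).headD 0 := by
  rcases acc with _ | ⟨r, rest⟩ <;>
    simp only [pvStepA, pvAddRun, pvSign, List.headD_nil, List.headD_cons] at h ⊢
  · subst h; split_ifs <;> rfl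
  · subst c
    split_ifs at * <;> simp only [List.headD_cons] <;> first | omega | simp_all
-- one step: A's new streak is B's reduce over the updated runs list
lemma step_best (acc : List Int) (a c v : Int) (h2 : c = acc.headD 0)
    (h1 : a = acc.reverse.foldl pvBest 0) :
    (pvStepA (a, c) v).1 = ((pvAddRun acc v).reverse).foldl pvBest 0 := by
  rcases acc with _ | ⟨r, rest⟩
  · simp only [List.headD_nil, List.reverse_nil, List.foldl_nil] at h2 h1
    subst h2; subst h1
    simp only [pvStepA, pvAddRun, pvSign, List.reverse_cons, List.reverse_nil, List.nil_append,
      List.foldl_cons, List.foldl_nil, pvBest]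
    split_ifs <;> omega
  · simp only [List.headD_cons] at h2
    subst c
    rw [show (r :: rest).reverse = rest.reverse ++ [r] by simp, List.foldl_append,
      List.foldl_cons, List.foldl_nil] at h1
    simp only [pvStepA, pvAddRun, pvSign, pvBest] at h1 ⊢
    split_ifs at * <;>
      simp only [List.reverse_cons, List.foldl_append, List.foldl_cons, List.foldl_nil,
        pvBest] at h1 ⊢ <;>
      split_ifs at * <;> first | omega | simp_all

lemma streak_inv (l : List Int) (acc : List Int) (a c : Int)
    (h2 : c = acc.headD 0) (h1 : a = acc.reverse.foldl pvBest 0) :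
    (l.foldl pvStepA (a, c)).1 = ((l.foldl pvAddRun acc).reverse).foldl pvBest 0 := by
  induction l generalizing acc a c with
  | nil => simpa using h1
  | cons v l ih =>
    simp only [List.foldl_cons]
    exact ih (pvAddRun acc v) (pvStepA (a, c) v).1 (pvStepA (a, c) v).2
      (step_head acc a c v h2) (step_best acc a c v h2 h1)

-- ===== VERDICT (by name: the statement is the Claim_ definition above) =====
theorem compute_streak_spec : Claim_equal_compute_streak := by
  intro returns _
  unfold Spec_compute_streak compute_streak compute_streak_alt
  exact streak_inv returns [] 0 0 rfl rfl
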